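-- pv_equiv track=rewrite | github.com/yourzinc/algorithm | ayeon/implementation/7490.py | check
-- ===== SOURCE A (Python) =====
-- def check(result):
--     a = 0
--     result = result.replace(" ", "")
--     n = ''
--     for i in range(len(result)-1, -1, -1):
--         if result[i] == '+' :
--             a += int(n)
--             n = ''
--         elif result[i] == '-':
--             a -= int(n)
--             n = ''
--         else:
--             n = result[i] + n
--
--     if n != '':
--         a += int(n)
--
--     if a == 0:
--         return True
--     return False
-- ===== SOURCE B (Python) =====
-- def check(result):
--     s = result.replace(" ", "")
--     a = 0
--     num = ''
--     pending = None  # None = still reading the leading term (which may be empty)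
--     for ch in s:
--         if ch == '+' or ch == '-':
--             if pending is None:
--                 if num != '':
--                     a += int(num)
--             else:
--                 a += pending * int(num)
--             pending = 1 if ch == '+' else -1
--             num = ''
--         else:
--             num += ch
--     if pending is None:
--         if num != '':
--             a += int(num)
--     else:
--         a += pending * int(num)
--     return a == 0
-- ===== Notes on version B (the rewrite author's own statement) =====
-- stated objective: idiomatic
-- what changed: B scans the expression left-to-right with a pending-sign accumulator (finalizing each number when the next sign arrives), instead of A's right-to-left index loop that prepends characters and applies each sign to the number on its right.
import Mathlib
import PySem

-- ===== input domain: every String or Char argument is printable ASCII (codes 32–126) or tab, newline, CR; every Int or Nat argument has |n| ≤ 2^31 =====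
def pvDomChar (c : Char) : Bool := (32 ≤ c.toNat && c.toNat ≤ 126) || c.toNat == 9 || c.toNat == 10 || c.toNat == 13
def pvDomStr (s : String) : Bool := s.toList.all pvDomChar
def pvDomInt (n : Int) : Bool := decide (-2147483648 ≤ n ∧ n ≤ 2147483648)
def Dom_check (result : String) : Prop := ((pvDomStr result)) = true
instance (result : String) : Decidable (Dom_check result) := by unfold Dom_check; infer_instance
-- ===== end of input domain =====

-- B scans left-to-right with a pending-sign accumulator instead of A's right-to-left
-- index loop; same O(n) cost, proved to return the same Bool on all inputs where A returns.


-- ===== PORT A =====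
-- int(n): Pre_check guarantees every int() call A evaluates succeeds; the getD 0
-- default is never reached inside Pre_check.
def pvInt (n : List Char) : Int := (PySem.Int.ofChars? n).getD 0

-- A: `for i in range(len(result)-1, -1, -1): ... result[i]` visits exactly the characters
-- of the (space-free) string from last to first, ported as a foldl over the reversed list.
def check (result : String) : Bool :=
  let s := PySem.Str.replace result " " ""
  let st := s.toList.reverse.foldl
    (fun (st : Int × List Char) c =>
      if c = '+' then (st.1 + pvInt st.2, [])
      else if c = '-' then (st.1 - pvInt st.2, [])
      else (st.1, c :: st.2))           -- n = result[i] + n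
    (0, [])
  let a := if st.2 ≠ [] then st.1 + pvInt st.2 else st.1
  a == 0

-- ===== PORT B =====
-- the shared finalize step of Source B (used at each sign and once after the loop)
def bFin (a : Int) (num : List Char) (pending : Option Int) : Int :=
  match pending with
  | none => if num ≠ [] then a + pvInt num else a
  | some p => a + p * pvInt num


-- B's loop body: state (a, num, pending); on a sign, finalize the number just read
-- (leading term guarded by `pending = none`), else append the char to num.
def bStep (st : Int × List Char × Option Int) (c : Char) : Int × List Char × Option Int :=
  if c = '+' ∨ c = '-' then
    (bFin st.1 st.2.1 st.2.2, [], some (if c = '+' then (1 : Int) else -1))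
  else (st.1, st.2.1 ++ [c], st.2.2)

def check_alt (result : String) : Bool :=
  let s := PySem.Str.replace result " " ""
  let st := s.toList.foldl bStep (0, [], none)
  bFin st.1 st.2.1 st.2.2 == 0

-- ===== PRECONDITION & SPEC =====
-- the leading (leftmost) run of non-sign characters of the space-free string
def firstSeg : List Char → List Char
  | [] => []
  | c :: t => if c = '+' ∨ c = '-' then [] else c :: firstSeg t

-- every number group strictly to the right of some sign must parse as an int
def tailOK : List Char → Bool
  | [] => true
  | c :: t => (if c = '+' ∨ c = '-' then (PySem.Int.ofChars? (firstSeg t)).isSome else true) && tailOK t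

-- Pre_check: exactly the inputs where Python A returns (no ValueError from int()):
-- after removing spaces, every number group following a sign is nonempty and int-parseable,
-- and the leading group is empty or int-parseable.
def Pre_check (result : String) : Prop :=
  let l := (PySem.Str.replace result " " "").toList
  (firstSeg l = [] ∨ (PySem.Int.ofChars? (firstSeg l)).isSome = true) ∧ tailOK l = true
instance (result : String) : Decidable (Pre_check result) := by unfold Pre_check; infer_instance
def pvWitness_check : String := "1 + 2 - 3"

def Spec_check (result : String) (out : Bool) : Prop := out = check_alt result
instance (result : String) (out : Bool) : Decidable (Spec_check result out) := by unfold Spec_check; infer_instance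

-- ===== CLAIM (what is proved, stated in full; the proofs are below) =====
def Claim_equal_check : Prop := ∀ (result : String), Dom_check result → Pre_check result → Spec_check result (check result)

-- ===== LEMMAS AND PROOFS =====
-- signed sum of all the number groups to the right of the first sign (A's `a`)
def sumTail : List Char → Int
  | [] => 0
  | c :: t =>
    if c = '+' then sumTail t + pvInt (firstSeg t)
    else if c = '-' then sumTail t - pvInt (firstSeg t)
    else sumTail t

theorem aLoop_eq (l : List Char) :
    l.reverse.foldl
      (fun (st : Int × List Char) c =>
        if c = '+' then (st.1 + pvInt st.2, [])
        else if c = '-' then (st.1 - pvInt st.2, [])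
        else (st.1, c :: st.2)) (0, []) = (sumTail l, firstSeg l) := by
  rw [List.foldl_reverse]
  induction l with
  | nil => rfl
  | cons c t ih =>
    rw [List.foldr_cons, ih]
    by_cases h1 : c = '+'
    · subst h1; simp [sumTail, firstSeg]
    · by_cases h2 : c = '-'
      · subst h2; simp [sumTail, firstSeg]
      · simp [sumTail, firstSeg, h1, h2]

theorem bLoop_eq (l : List Char) (a : Int) (num : List Char) (p : Option Int) :
    bFin (l.foldl bStep (a, num, p)).1 (l.foldl bStep (a, num, p)).2.1
        (l.foldl bStep (a, num, p)).2.2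
      = bFin a (num ++ firstSeg l) p + sumTail l := by
  induction l generalizing a num p with
  | nil => simp [firstSeg, sumTail]
  | cons c t ih =>
    rw [List.foldl_cons]
    by_cases hs : c = '+' ∨ c = '-'
    · have hb : bStep (a, num, p) c
          = (bFin a num p, [], some (if c = '+' then (1 : Int) else -1)) := by
        simp [bStep, hs, bFin]
      rw [hb, ih]
      simp only [firstSeg, sumTail, hs, if_true, List.nil_append, List.append_nil]
      generalize bFin a num p = A
      rcases hs with h | h <;> subst h <;> simp [bFin] <;> ring
    · have hb : bStep (a, num, p) c = (a, num ++ [c], p) := by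
        simp [bStep, hs]
      rw [not_or] at hs
      rw [hb, ih]
      simp [firstSeg, sumTail, hs.1, hs.2, List.append_assoc]

-- ===== VERDICT (by name: the statement is the Claim_ definition above) =====
theorem check_spec : Claim_equal_check := by
  intro result _ _
  unfold Spec_check check check_alt
  simp only [aLoop_eq, bLoop_eq, List.nil_append, PySem.Str.toList_replace]
  by_cases h : firstSeg (PySem.Chars.replace result.toList " ".toList "".toList) = [] <;>
    simp only [bFin, h, ne_eq, not_true_eq_false, not_false_eq_true, if_pos, if_neg] <;>
    (congr 1; ring)
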